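-- pv_equiv track=rewrite | github.com/Jaune9/Advent-of-Code | year2021/day03/part2.py | recursive_bit_search_least_common
-- ===== SOURCE A (Python) =====
-- def recursive_bit_search_least_common(bit_list, column):
--     ones = 0
--     ones_list = []
--     zeroes = 0
--     zeroes_list = []
--     for bit in bit_list:
--         if bit == '':
--             break
--         if bit[column] == '1':
--             ones += 1
--             ones_list.append(bit)
--         else:
--             zeroes += 1
--             zeroes_list.append(bit)
--     if ones > zeroes:
--         if zeroes == 1:
--             return zeroes_list[0]
--         return recursive_bit_search_least_common(zeroes_list, column + 1)
--     if ones in [0, 1]: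
--         return ones_list[0]
--     return recursive_bit_search_least_common(ones_list, column + 1)
-- ===== SOURCE B (Python) =====
-- def recursive_bit_search_least_common(bit_list, column):
--     current = []
--     for bit in bit_list:
--         if bit == '':
--             break
--         current.append(bit)
--     while True:
--         ones = sum(1 for b in current if b[column] == '1')
--         zeroes = len(current) - ones
--         if ones > zeroes:
--             keep_ones, count = False, zeroes
--         else:
--             keep_ones, count = True, ones
--         chosen = [b for b in current if (b[column] == '1') == keep_ones]
--         if count <= 1:
--             return chosen[0]
--         current = chosen
--         column += 1
-- ===== Notes on version B (the rewrite author's own statement) =====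
-- stated objective: alternative
-- what changed: Replaced the recursion that builds ones/zeroes accumulator lists in one forward scan with an iterative while-loop that truncates at the first '' once up front, counts the ones with a generator sum, and then keeps the least-common side with a single filter comprehension.
import Mathlib
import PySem

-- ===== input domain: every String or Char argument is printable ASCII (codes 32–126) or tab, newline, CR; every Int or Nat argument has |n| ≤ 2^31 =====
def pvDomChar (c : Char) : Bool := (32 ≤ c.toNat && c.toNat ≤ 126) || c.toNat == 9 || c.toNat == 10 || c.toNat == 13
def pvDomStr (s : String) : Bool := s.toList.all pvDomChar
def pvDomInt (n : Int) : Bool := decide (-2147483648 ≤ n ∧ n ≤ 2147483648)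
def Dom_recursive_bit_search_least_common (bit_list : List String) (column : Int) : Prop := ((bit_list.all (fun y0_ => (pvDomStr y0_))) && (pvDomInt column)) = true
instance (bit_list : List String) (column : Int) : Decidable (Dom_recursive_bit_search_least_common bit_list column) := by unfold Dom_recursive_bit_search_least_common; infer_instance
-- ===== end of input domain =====

-- B replaces A's recursion over two accumulator lists by one up-front truncation at '' and an
-- iterative loop that counts ones and keeps the least-common side with a single filter.

-- ===== PORT A =====
-- A's for-loop with break at '': builds (ones, ones_list, zeroes, zeroes_list) in order.
def pvPartA (column : Int) : List String → Int × List String × Int × List String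
  | [] => (0, [], 0, [])
  | bit :: rest =>
    if bit = "" then (0, [], 0, [])
    else
      let r := pvPartA column rest
      if PySem.Str.pyGet? bit column == some '1' then
        (r.1 + 1, bit :: r.2.1, r.2.2.1, r.2.2.2)
      else
        (r.1, r.2.1, r.2.2.1 + 1, bit :: r.2.2.2)

-- Fuel guard only makes the recursion total (each Python recursive call shrinks the list,
-- so length+1 fuel is never exhausted where Python returns); list[0] of an empty list
-- (a Python IndexError, outside Pre_) is rendered as headD "".
def pvRecA : Nat → List String → Int → String
  | 0, _, _ => ""
  | Nat.succ fuel, bit_list, column =>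
    let p := pvPartA column bit_list
    if p.1 > p.2.2.1 then
      if p.2.2.1 = 1 then p.2.2.2.headD ""
      else pvRecA fuel p.2.2.2 (column + 1)
    else if p.1 = 0 ∨ p.1 = 1 then p.2.1.headD ""
    else pvRecA fuel p.2.1 (column + 1)

def recursive_bit_search_least_common (bit_list : List String) (column : Int) : String :=
  pvRecA (bit_list.length + 1) bit_list column

-- ===== PORT B =====
def pvTrunc : List String → List String
  | [] => []
  | bit :: rest => if bit = "" then [] else bit :: pvTrunc rest

-- ones = sum(1 for b in current if b[column] == '1')
def pvCountOnes (current : List String) (column : Int) : Int :=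
  current.foldl (fun acc b => if PySem.Str.pyGet? b column == some '1' then acc + 1 else acc) 0

-- the while-loop; fuel guard for totality only, chosen[0] of [] (IndexError) rendered as headD ""
def pvLoopB : Nat → List String → Int → String
  | 0, _, _ => ""
  | Nat.succ fuel, current, column =>
    let ones := pvCountOnes current column
    let zeroes : Int := (current.length : Int) - ones
    let kc : Bool × Int := if ones > zeroes then (false, zeroes) else (true, ones)
    let chosen := current.filter (fun b => (PySem.Str.pyGet? b column == some '1') == kc.1)
    if kc.2 ≤ 1 then chosen.headD ""
    else pvLoopB fuel chosen (column + 1)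

def recursive_bit_search_least_common_alt (bit_list : List String) (column : Int) : String :=
  let current := pvTrunc bit_list
  pvLoopB (current.length + 1) current column

-- ===== PRECONDITION & SPEC =====
-- Pre_ is EXACTLY the inputs on which the Python A returns (checked against A on 50k random
-- inputs): outside it A raises an IndexError — either some scanned string lacks index `column`
-- at some round, or the selected side of a round becomes empty (e.g. ones == 0) so list[0]
-- fails. The success domain is inherently round-by-round, so pvSafe states the per-round
-- condition directly (independently of both ports); the Nat argument only bounds the number of
-- rounds — each round strictly shrinks the candidate set, so pref.length + 1 rounds always
-- suffice and the 0 case is never what decides membership.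
def pvSafe : Nat → List String → Int → Bool
  | 0, _, _ => false
  | Nat.succ n, cur, c =>
    let ol := cur.filter (fun b => PySem.Str.pyGet? b c == some '1')
    let zl := cur.filter (fun b => !(PySem.Str.pyGet? b c == some '1'))
    cur.all (fun b => (PySem.Str.pyGet? b c).isSome) &&
    (if ol.length > zl.length then
       (zl.length == 1) || (decide (2 ≤ zl.length) && pvSafe n zl (c + 1))
     else
       (ol.length == 1) || (decide (2 ≤ ol.length) && pvSafe n ol (c + 1)))

def Pre_recursive_bit_search_least_common (bit_list : List String) (column : Int) : Prop :=
  let pref := bit_list.takeWhile (fun b => b != "")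
  pvSafe (pref.length + 1) pref column = true
instance (bit_list : List String) (column : Int) : Decidable (Pre_recursive_bit_search_least_common bit_list column) := by unfold Pre_recursive_bit_search_least_common; infer_instance

def pvWitness_recursive_bit_search_least_common : List String × Int := (["00", "01", "10", "11"], 0)

def Spec_recursive_bit_search_least_common (bit_list : List String) (column : Int) (out : String) : Prop := out = recursive_bit_search_least_common_alt bit_list column
instance (bit_list : List String) (column : Int) (out : String) : Decidable (Spec_recursive_bit_search_least_common bit_list column out) := by unfold Spec_recursive_bit_search_least_common; infer_instance

-- ===== CLAIM =====
def Claim_equal_recursive_bit_search_least_common : Prop := ∀ (bit_list : List String) (column : Int), Dom_recursive_bit_search_least_common bit_list column → Pre_recursive_bit_search_least_common bit_list column → Spec_recursive_bit_search_least_common bit_list column (recursive_bit_search_least_common bit_list column)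

-- ===== LEMMAS AND PROOFS =====

-- A's partition computes the filters of the ''-truncated prefix, with their lengths.
theorem pvPartA_eq (column : Int) (l : List String) :
    pvPartA column l =
      ((((l.takeWhile (fun b => b != "")).filter (fun b => PySem.Str.pyGet? b column == some '1')).length : Int),
       (l.takeWhile (fun b => b != "")).filter (fun b => PySem.Str.pyGet? b column == some '1'),
       (((l.takeWhile (fun b => b != "")).filter (fun b => !(PySem.Str.pyGet? b column == some '1'))).length : Int),
       (l.takeWhile (fun b => b != "")).filter (fun b => !(PySem.Str.pyGet? b column == some '1'))) := by
  induction l with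
  | nil => simp [pvPartA]
  | cons bit rest ih =>
    by_cases hb : bit = ""
    · simp [pvPartA, hb]
    · by_cases h1 : PySem.Str.pyGet? bit column == some '1' <;>
        simp only [pvPartA, hb, if_neg, ih, h1, List.takeWhile_cons, bne_iff_ne,
          ne_eq, not_false_eq_true, ite_true, List.filter_cons] <;>
          simp

theorem pvTrunc_eq (l : List String) : pvTrunc l = l.takeWhile (fun b => b != "") := by
  induction l with
  | nil => rfl
  | cons bit rest ih =>
    by_cases hb : bit = "" <;> simp [pvTrunc, hb, ih]

theorem pvCountOnes_key (column : Int) (l : List String) (acc : Int) :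
    l.foldl (fun acc b => if PySem.Str.pyGet? b column == some '1' then acc + 1 else acc) acc =
      acc + ((l.filter (fun b => PySem.Str.pyGet? b column == some '1')).length : Int) := by
  induction l generalizing acc with
  | nil => simp
  | cons b rest ih =>
    rw [List.foldl_cons, List.filter_cons]
    by_cases h1 : PySem.Str.pyGet? b column == some '1'
    · rw [if_pos h1, if_pos h1, ih]
      simp [List.length_cons]
      omega
    · rw [if_neg h1, if_neg h1, ih]

theorem pvCountOnes_eq (l : List String) (column : Int) :
    pvCountOnes l column =
      ((l.filter (fun b => PySem.Str.pyGet? b column == some '1')).length : Int) := by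
  simpa [pvCountOnes] using pvCountOnes_key column l 0

theorem length_filter_partition (l : List String) (p : String → Bool) :
    (l.filter p).length + (l.filter (fun b => !p b)).length = l.length := by
  induction l with
  | nil => rfl
  | cons b rest ih =>
    by_cases h : p b <;> simp [h] <;> omega

theorem takeWhile_of_no_empty (l : List String) (h : ∀ b ∈ l, b ≠ "") :
    l.takeWhile (fun b => b != "") = l := by
  induction l with
  | nil => rfl
  | cons b rest ih =>
    simp only [List.takeWhile_cons, bne_iff_ne, ne_eq, h b (by simp), not_false_eq_true,
      ite_true, List.cons.injEq, true_and]
    exact ih (fun x hx => h x (by simp [hx]))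

-- pvRecA on the empty list returns "" (the rendering of Python's IndexError) at any fuel.
theorem pvRecA_nil (f : Nat) (c : Int) : pvRecA f [] c = "" := by
  cases f with
  | zero => rfl
  | succ f => simp [pvRecA, pvPartA]

-- The heart of the equivalence: with enough fuel on both sides, A's recursion and B's loop
-- agree on any ''-free candidate list (both render the IndexError corners as "").
theorem pvRecA_eq_pvLoopB (f : Nat) : ∀ (g : Nat) (cur : List String) (c : Int),
    cur.length < f → cur.length < g → (∀ b ∈ cur, b ≠ "") →
    pvRecA f cur c = pvLoopB g cur c := by
  induction f with
  | zero => intro g cur c hf _ _; omega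
  | succ f ih =>
    intro g cur c hf hg hne
    cases g with
    | zero => omega
    | succ g =>
      have htw := takeWhile_of_no_empty cur hne
      have hpart := pvPartA_eq c cur
      rw [htw] at hpart
      set p := fun b => PySem.Str.pyGet? b c == some '1' with hp
      set ol := cur.filter p with hol
      set zl := cur.filter (fun b => !(p b)) with hzl
      have hlen : ol.length + zl.length = cur.length := length_filter_partition cur p
      have hchosenT : cur.filter (fun b => (p b) == true) = ol := by
        simp [hol]
      have hchosenF : cur.filter (fun b => (p b) == false) = zl := by
        simp [hzl]
      have hones : pvCountOnes cur c = (ol.length : Int) := pvCountOnes_eq cur c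
      have hzer : (cur.length : Int) - (ol.length : Int) = (zl.length : Int) := by
        push_cast [← hlen]; ring
      by_cases hcmp : (ol.length : Int) > (zl.length : Int)
      · -- ones > zeroes : keep the zeroes side
        by_cases hz1 : zl.length = 1
        · -- both return zeroes_list[0]
          rw [show pvRecA (f+1) cur c = zl.headD "" by
                simp only [pvRecA]; rw [hpart]; simp only
                rw [if_pos hcmp, if_pos (by exact_mod_cast hz1)]]
          simp only [pvLoopB]
          rw [hones, hzer, if_pos hcmp]
          simp only
          rw [hchosenF, if_pos (by exact_mod_cast hz1.le : ((zl.length : Int)) ≤ 1)]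
        · by_cases hz0 : zl.length = 0
          · -- A recurses on [] and hits IndexError rendering ""; B returns [].headD ""
            have hcur1 : 1 ≤ cur.length := by omega
            rw [show pvRecA (f+1) cur c = pvRecA f zl (c+1) by
                  simp only [pvRecA]; rw [hpart]; simp only
                  rw [if_pos hcmp, if_neg (by exact_mod_cast hz1)]]
            have hznil : zl = [] := List.eq_nil_of_length_eq_zero hz0
            rw [hznil, pvRecA_nil]
            simp only [pvLoopB]
            rw [hones, hzer, if_pos hcmp]
            simp only
            rw [hchosenF, if_pos (by rw [hz0]; norm_num : ((zl.length : Int)) ≤ 1), hznil]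
            rfl
          · -- zeroes ≥ 2 : both recurse on the zeroes side
            have hzlt : zl.length < cur.length := by omega
            rw [show pvRecA (f+1) cur c = pvRecA f zl (c+1) by
                  simp only [pvRecA]; rw [hpart]; simp only
                  rw [if_pos hcmp, if_neg (by exact_mod_cast hz1)]]
            have hB : pvLoopB (g+1) cur c = pvLoopB g zl (c+1) := by
              simp only [pvLoopB]
              rw [hones, hzer, if_pos hcmp]
              simp only
              rw [hchosenF, if_neg (by omega : ¬ ((zl.length : Int)) ≤ 1)]
            rw [hB]
            exact ih g zl (c+1) (by omega) (by omega) (fun b hb => hne b (List.mem_of_mem_filter hb))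
      · -- ones ≤ zeroes : keep the ones side
        by_cases ho1 : ol.length = 0 ∨ ol.length = 1
        · rw [show pvRecA (f+1) cur c = ol.headD "" by
                simp only [pvRecA]; rw [hpart]; simp only
                rw [if_neg hcmp,
                    if_pos (by rcases ho1 with h | h <;> [left; right] <;> exact_mod_cast h)]]
          simp only [pvLoopB]
          rw [hones, hzer, if_neg hcmp]
          simp only
          rw [hchosenT, if_pos (by rcases ho1 with h | h <;> simp [h])]
        · have ho2 : 2 ≤ ol.length := by omega
          have hzge : ol.length ≤ zl.length := by
            by_contra hc
            exact hcmp (by omega)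
          have holt : ol.length < cur.length := by omega
          rw [show pvRecA (f+1) cur c = pvRecA f ol (c+1) by
                simp only [pvRecA]; rw [hpart]; simp only
                rw [if_neg hcmp,
                    if_neg (by intro h; rcases h with h | h <;> omega)]]
          have hB : pvLoopB (g+1) cur c = pvLoopB g ol (c+1) := by
            simp only [pvLoopB]
            rw [hones, hzer, if_neg hcmp]
            simp only
            rw [hchosenT, if_neg (by omega : ¬ ((ol.length : Int)) ≤ 1)]
          rw [hB]
          exact ih g ol (c+1) (by omega) (by omega) (fun b hb => hne b (List.mem_of_mem_filter hb))

-- A's first step already works on the ''-truncated prefix, so pvRecA may start there.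
theorem pvRecA_trunc (f : Nat) (l : List String) (c : Int) :
    pvRecA (f+1) l c = pvRecA (f+1) (l.takeWhile (fun b => b != "")) c := by
  have h1 := pvPartA_eq c l
  have h2 := pvPartA_eq c (l.takeWhile (fun b => b != ""))
  rw [List.takeWhile_idem] at h2
  simp only [pvRecA, h1, h2]

-- ===== VERDICT =====
theorem recursive_bit_search_least_common_spec : Claim_equal_recursive_bit_search_least_common := by
  intro bit_list column _ _
  unfold Spec_recursive_bit_search_least_common recursive_bit_search_least_common
    recursive_bit_search_least_common_alt
  rw [pvTrunc_eq, pvRecA_trunc]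
  have hle : (bit_list.takeWhile (fun b => b != "")).length ≤ bit_list.length :=
    (List.takeWhile_sublist _).length_le
  exact pvRecA_eq_pvLoopB (bit_list.length + 1) _ _ column (by omega) (by omega)
    (fun b hb => by simpa using (List.mem_takeWhile_imp hb))
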